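-- pv_equiv track=rewrite | github.com/yrankineNEU/CodePathTIP102 | Unit3_QueueStackPointers/session2_simple2.py | merge_schedules
-- ===== SOURCE A (Python) =====
-- def merge_schedules(schedule1, schedule2):
--     # initalize final schedule
--     final =[]
--
--     ptr_1 = 0
--     ptr_2 = 0
--
--     # add letters to final list from both schedules as long as lengths are equal
--     while ptr_1 < len(schedule1) and ptr_2 < len(schedule2):
--         final.append(schedule1[ptr_1])
--         final.append(schedule2[ptr_2])
--
--         ptr_1 += 1
--         ptr_2 += 1
--
--     # if schedule 2 is shorter, keep adding letters from schedule 1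
--     while ptr_1 < len(schedule1):
--         final.append(schedule1[ptr_1])
--         ptr_1 += 1
--
--
--     while ptr_2 < len(schedule2):
--         final.append(schedule2[ptr_2])
--         ptr_2 += 1
--
--
--     return "".join(final)
-- ===== SOURCE B (Python) =====
-- from collections import deque
--
-- def merge_schedules(schedule1, schedule2):
--     # round-robin over a queue of iterators: pop a stream, emit one char,
--     # re-enqueue it if it still has characters; exhausted streams drop out
--     queue = deque((iter(schedule1), iter(schedule2)))
--     out = []
--     while queue:
--         it = queue.popleft()
--         c = next(it, None)
--         if c is not None:
--             out.append(c)
--             queue.append(it)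
--     return "".join(out)
-- ===== Notes on version B (the rewrite author's own statement) =====
-- stated objective: alternative
-- what changed: Replaces A's three staged two-pointer while loops with a single round-robin scheduler: a deque of the two character iterators, each loop step popping one stream, emitting one character and re-enqueueing the stream until exhausted, so no pointers and no separate drain loops exist.
import Mathlib
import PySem

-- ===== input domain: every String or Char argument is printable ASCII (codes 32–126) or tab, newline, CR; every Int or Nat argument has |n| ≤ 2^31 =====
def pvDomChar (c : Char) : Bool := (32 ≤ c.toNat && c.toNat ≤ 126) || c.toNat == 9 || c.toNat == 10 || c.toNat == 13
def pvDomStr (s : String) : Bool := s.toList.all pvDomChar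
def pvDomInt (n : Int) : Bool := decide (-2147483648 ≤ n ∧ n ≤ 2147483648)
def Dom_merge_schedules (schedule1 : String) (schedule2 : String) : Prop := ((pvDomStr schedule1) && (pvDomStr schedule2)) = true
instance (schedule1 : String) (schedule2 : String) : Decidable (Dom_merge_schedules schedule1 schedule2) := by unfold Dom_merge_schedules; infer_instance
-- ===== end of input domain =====

-- B replaces A's three staged two-pointer while loops with a single round-robin loop over
-- a queue of the two character streams (alternative decomposition; same asymptotic cost).


-- ===== PORT A =====
-- first while loop: advances both pointers while both are in range
def mergeBoth : List Char → List Char → List Char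
  | a :: as, b :: bs => a :: b :: mergeBoth as bs
  | as, bs => mergeDrain as bs
where
  -- the two drain while loops: whichever schedule remains is appended element by element
  mergeDrain : List Char → List Char → List Char
  | a :: as, bs => a :: mergeDrain as bs
  | [], b :: bs => b :: mergeDrain [] bs
  | [], [] => []

def merge_schedules (schedule1 : String) (schedule2 : String) : String :=
  String.ofList (mergeBoth schedule1.toList schedule2.toList)

-- ===== PORT B =====
-- the while loop of Source B: a queue of character streams; pop the front stream, emit one
-- character and re-enqueue the stream unless it is exhausted (iterators = List Char)
def rrLoop (queue : List (List Char)) (out : List Char) : List Char :=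
  match queue with
  | [] => out
  | it :: rest =>
    match it with
    | [] => rrLoop rest out
    | c :: cs => rrLoop (rest ++ [cs]) (out ++ [c])
termination_by (queue.map (fun l => l.length + 1)).sum
decreasing_by
  all_goals (simp; try omega)

def merge_schedules_alt (schedule1 : String) (schedule2 : String) : String :=
  String.ofList (rrLoop [schedule1.toList, schedule2.toList] [])

-- ===== PRECONDITION & SPEC =====
def Spec_merge_schedules (schedule1 : String) (schedule2 : String) (out : String) : Prop := out = merge_schedules_alt schedule1 schedule2
instance (schedule1 : String) (schedule2 : String) (out : String) : Decidable (Spec_merge_schedules schedule1 schedule2 out) := by unfold Spec_merge_schedules; infer_instance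

-- ===== CLAIM (what is proved, stated in full; the proofs are below) =====
def Claim_equal_merge_schedules : Prop := ∀ (schedule1 : String) (schedule2 : String), Dom_merge_schedules schedule1 schedule2 → Spec_merge_schedules schedule1 schedule2 (merge_schedules schedule1 schedule2)

-- ===== LEMMAS AND PROOFS =====
-- A's drain phase is plain concatenation
theorem mergeDrain_eq_append (as bs : List Char) : mergeBoth.mergeDrain as bs = as ++ bs := by
  induction as with
  | nil =>
    induction bs with
    | nil => simp [mergeBoth.mergeDrain]
    | cons b bs ih => simp [mergeBoth.mergeDrain, ih]
  | cons a as ih => simp [mergeBoth.mergeDrain, ih]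

-- B's round robin on a one-stream queue just drains that stream
theorem rrLoop_single (xs out : List Char) : rrLoop [xs] out = out ++ xs := by
  induction xs generalizing out with
  | nil => simp [rrLoop]
  | cons x xs ih => simp [rrLoop, ih]

-- B's round robin on the two-stream queue computes A's merge
theorem rrLoop_pair (as bs out : List Char) :
    rrLoop [as, bs] out = out ++ mergeBoth as bs := by
  induction as generalizing bs out with
  | nil =>
    cases bs with
    | nil => simp [rrLoop, mergeBoth, mergeBoth.mergeDrain]
    | cons b bs =>
      simp [rrLoop, rrLoop_single, mergeBoth, mergeDrain_eq_append]
  | cons a as ih =>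
    cases bs with
    | nil =>
      simp [rrLoop, rrLoop_single, mergeBoth, mergeDrain_eq_append]
    | cons b bs =>
      simp [rrLoop, ih, mergeBoth]

-- ===== VERDICT (by name: the statement is the Claim_ definition above) =====
theorem merge_schedules_spec : Claim_equal_merge_schedules := by
  intro s1 s2 _
  show merge_schedules s1 s2 = merge_schedules_alt s1 s2
  simp [merge_schedules, merge_schedules_alt, rrLoop_pair]
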